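-- pv_equiv track=rewrite | github.com/pablooliva/redakt | src/redakt/services/anonymizer.py | generate_placeholders
-- ===== SOURCE A (Python) =====
-- def generate_placeholders(
--     entities: list[dict],
-- ) -> tuple[dict[str, str], dict[int, str]]:
--     """Assign numbered placeholders to entities.
--
--     Key: (entity_type, original_text) -> same placeholder.
--     Counter is per entity type, starting at 1.
--
--     Returns:
--         mappings: {"<PERSON_1>": "John Smith", ...}
--         entity_placeholder_map: {entity_index: "<PERSON_1>", ...} keyed by index in input list
--     """
--     # Track (entity_type, text) -> placeholder
--     seen: dict[tuple[str, str], str] = {}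
--     # Counter per entity type
--     counters: dict[str, int] = {}
--     # Mapping: placeholder -> original value
--     mappings: dict[str, str] = {}
--     # Which placeholder each entity gets (by list index)
--     entity_placeholder_map: dict[int, str] = {}
--
--     for i, entity in enumerate(entities):
--         entity_type = entity["entity_type"]
--         original_text = entity["original_text"]
--         key = (entity_type, original_text)
--
--         if key in seen:
--             entity_placeholder_map[i] = seen[key]
--         else:
--             counter = counters.get(entity_type, 0) + 1
--             counters[entity_type] = counter
--             placeholder = f"<{entity_type}_{counter}>"
--             seen[key] = placeholder
--             mappings[placeholder] = original_text
--             entity_placeholder_map[i] = placeholder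
--
--     return mappings, entity_placeholder_map
-- ===== SOURCE B (Python) =====
-- def generate_placeholders(entities):
--     # Different algorithm: no running counters dict and no membership-guarded loop.
--     # Dedup keys in first-appearance order, group the texts by type, and read each
--     # key's number off its position inside its type's group.
--     keys = [(e["entity_type"], e["original_text"]) for e in entities]
--     firsts = list(dict.fromkeys(keys))
--     groups = {}
--     for t, txt in firsts:
--         groups.setdefault(t, []).append(txt)
--     seen = {
--         (t, txt): f"<{t}_{n}>"
--         for t, texts in groups.items()
--         for n, txt in enumerate(texts, 1)
--     }
--     mappings = {seen[k]: k[1] for k in firsts}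
--     entity_placeholder_map = {i: seen[k] for i, k in enumerate(keys)}
--     return mappings, entity_placeholder_map
-- ===== Notes on version B (the rewrite author's own statement) =====
-- stated objective: alternative
-- what changed: A's single guarded loop threading four dicts (seen-membership test plus a per-type counters dict) is replaced by a staged pipeline: ordered dedup of the (type,text) keys, grouping texts by type, numbering each key by its position inside its type's group via enumerate, then two lookup passes for mappings and the index map.
import Mathlib
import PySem

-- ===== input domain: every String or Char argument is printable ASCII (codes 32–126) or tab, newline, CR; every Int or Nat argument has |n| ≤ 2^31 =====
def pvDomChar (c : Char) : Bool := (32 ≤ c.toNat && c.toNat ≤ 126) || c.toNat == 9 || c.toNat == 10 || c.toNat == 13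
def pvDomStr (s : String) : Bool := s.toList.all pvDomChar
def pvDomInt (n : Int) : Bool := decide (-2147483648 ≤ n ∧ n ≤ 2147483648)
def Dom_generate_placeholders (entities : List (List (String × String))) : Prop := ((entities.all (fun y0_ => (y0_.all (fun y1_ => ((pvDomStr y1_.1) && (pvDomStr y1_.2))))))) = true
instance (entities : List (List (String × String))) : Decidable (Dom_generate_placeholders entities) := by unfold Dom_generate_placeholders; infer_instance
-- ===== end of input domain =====

-- B replaces A's single guarded loop (seen-membership test plus a per-type counters dict, four dicts
-- threaded together) by a staged pipeline: ordered dedup of the keys, grouping texts by type, numbering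
-- by position inside the type's group, then two lookup passes; objective: alternative (same cost).

-- key extraction entity["entity_type"], entity["original_text"]; KeyError (missing key) is excluded by
-- Pre_generate_placeholders, on which getD with a dummy default is exact.
def pvKey (e : List (String × String)) : String × String :=
  ((PySem.Dict.mk e).getD "entity_type" "", (PySem.Dict.mk e).getD "original_text" "")

-- ===== PORT A =====
-- state: (seen, counters, mappings, entity_placeholder_map)
def pvStepA
    (s : PySem.Dict (String × String) String × PySem.Dict String Int ×
         PySem.Dict String String × PySem.Dict Int String)
    (p : Int × List (String × String)) :
    PySem.Dict (String × String) String × PySem.Dict String Int ×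
    PySem.Dict String String × PySem.Dict Int String :=
  let k := pvKey p.2
  if s.1.contains k then
    (s.1, s.2.1, s.2.2.1, s.2.2.2.insert p.1 (s.1.getD k ""))
  else
    let c := s.2.1.getD k.1 0 + 1
    let ph := "<" ++ k.1 ++ "_" ++ PySem.Int.toStr c ++ ">"
    (s.1.insert k ph, s.2.1.insert k.1 c, s.2.2.1.insert ph k.2, s.2.2.2.insert p.1 ph)

def generate_placeholders (entities : List (List (String × String))) :
    (List (String × String)) × (List (Int × String)) :=
  let s := (PySem.List.enumerate entities).foldl pvStepA
    (PySem.Dict.empty, PySem.Dict.empty, PySem.Dict.empty, PySem.Dict.empty)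
  (s.2.2.1.items, s.2.2.2.items)

-- ===== PORT B =====
-- f"<{t}_{n}>"
def pvPh (t : String) (n : Int) : String := "<" ++ t ++ "_" ++ PySem.Int.toStr n ++ ">"

-- groups.setdefault(t, []).append(txt) = groups[t] = groups.get(t, []) + [txt], i.e. Dict.modify (exact:
-- a present key keeps its position, a new key is appended at the end, like setdefault)
def pvGroupStep (g : PySem.Dict String (List String)) (k : String × String) :
    PySem.Dict String (List String) :=
  g.modify k.1 [] (fun v => v ++ [k.2])

-- the seen dict-comprehension: for (t, texts) in groups.items(), for (n, txt) in enumerate(texts, 1)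
def pvSeenOfGroups (items : List (String × List String)) :
    PySem.Dict (String × String) String :=
  items.foldl (fun m p =>
      (PySem.List.enumerate p.2 1).foldl (fun m q => m.insert (p.1, q.2) (pvPh p.1 q.1)) m)
    PySem.Dict.empty

def generate_placeholders_alt (entities : List (List (String × String))) :
    (List (String × String)) × (List (Int × String)) :=
  let keys := entities.map pvKey
  let firsts := PySem.List.dedup keys      -- list(dict.fromkeys(keys))
  let groups := firsts.foldl pvGroupStep PySem.Dict.empty
  let seen := pvSeenOfGroups groups.items
  -- seen[k] never raises here (every key of firsts is in seen), so getD with a dummy default is exact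
  let mappings := firsts.foldl (fun m k => m.insert (seen.getD k "") k.2) PySem.Dict.empty
  let epm := (PySem.List.enumerate keys).foldl
    (fun m p => m.insert p.1 (seen.getD p.2 "")) PySem.Dict.empty
  (mappings.items, epm.items)

-- ===== PRECONDITION & SPEC =====
-- Pre_ excludes exactly the inputs on which Python A raises KeyError: an entity dict missing the
-- "entity_type" or "original_text" key.
def Pre_generate_placeholders (entities : List (List (String × String))) : Prop :=
  ∀ e ∈ entities, "entity_type" ∈ e.map Prod.fst ∧ "original_text" ∈ e.map Prod.fst
instance (entities : List (List (String × String))) : Decidable (Pre_generate_placeholders entities) := by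
  unfold Pre_generate_placeholders; infer_instance

def pvWitness_generate_placeholders : (List (List (String × String))) :=
  [[("entity_type", "PERSON"), ("original_text", "John Smith")],
   [("entity_type", "PERSON"), ("original_text", "John Smith")]]

def Spec_generate_placeholders (entities : List (List (String × String)))
    (out : (List (String × String)) × (List (Int × String))) : Prop :=
  out = generate_placeholders_alt entities
instance (entities : List (List (String × String))) (out : (List (String × String)) × (List (Int × String))) : Decidable (Spec_generate_placeholders entities out) := by
  unfold Spec_generate_placeholders; infer_instance

-- ===== CLAIM (what is proved, stated in full; the proofs are below) =====
def Claim_equal_generate_placeholders : Prop := ∀ (entities : List (List (String × String))), Dom_generate_placeholders entities → Pre_generate_placeholders entities → Spec_generate_placeholders entities (generate_placeholders entities)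

-- ===== LEMMAS AND PROOFS =====

-- A's pass-1 state (seen, counters, mappings) as a step over the key alone
def pvStep1
    (s : PySem.Dict (String × String) String × PySem.Dict String Int ×
         PySem.Dict String String)
    (k : String × String) :
    PySem.Dict (String × String) String × PySem.Dict String Int ×
    PySem.Dict String String :=
  if s.1.contains k then s
  else
    let c := s.2.1.getD k.1 0 + 1
    (s.1.insert k (pvPh k.1 c), s.2.1.insert k.1 c, s.2.2.insert (pvPh k.1 c) k.2)

def pvProj3
    (s : PySem.Dict (String × String) String × PySem.Dict String Int ×
         PySem.Dict String String × PySem.Dict Int String) :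
    PySem.Dict (String × String) String × PySem.Dict String Int ×
    PySem.Dict String String :=
  (s.1, s.2.1, s.2.2.1)

-- number of keys of type t in p
def pvCnt (p : List (String × String)) (t : String) : Int :=
  ((p.filter (fun r => r.1 == t)).length : Int)

-- closed form of A's seen/mappings after pass 1 over a duplicate-free key list p
def pvSeenSpec (p : List (String × String)) : PySem.Dict (String × String) String :=
  (PySem.List.enumerate p).foldl
    (fun m q => m.insert q.2 (pvPh q.2.1 (1 + pvCnt (p.take q.1.toNat) q.2.1)))
    PySem.Dict.empty

def pvMappSpec (p : List (String × String)) : PySem.Dict String String :=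
  (PySem.List.enumerate p).foldl
    (fun m q => m.insert (pvPh q.2.1 (1 + pvCnt (p.take q.1.toNat) q.2.1)) q.2.2)
    PySem.Dict.empty

-- the first-occurrence keys of l that are not already in the dict d
def pvFresh (d : PySem.Dict (String × String) String) :
    List (String × String) → List (String × String)
  | [] => []
  | k :: l => if d.contains k then pvFresh d l else k :: pvFresh (d.insert k "") l

theorem pv_enumerate_map {α β : Type} (l : List α) (f : α → β) (s : Int) :
    PySem.List.enumerate (l.map f) s = (PySem.List.enumerate l s).map (fun q => (q.1, f q.2)) := by
  induction l generalizing s with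
  | nil => rfl
  | cons x l ih => simp [PySem.List.enumerate_cons, ih]

-- A's first three state components ignore the index and evolve by pvStep1 on the keys
theorem pv_proj3_foldl (l : List (Int × List (String × String)))
    (s : PySem.Dict (String × String) String × PySem.Dict String Int ×
         PySem.Dict String String × PySem.Dict Int String) :
    pvProj3 (l.foldl pvStepA s) = (l.map (fun p => pvKey p.2)).foldl pvStep1 (pvProj3 s) := by
  induction l generalizing s with
  | nil => rfl
  | cons p l ih =>
      simp only [List.foldl_cons, List.map_cons, ih]
      congr 1
      unfold pvStepA pvStep1 pvProj3 pvPh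
      by_cases h : s.1.contains (pvKey p.2) = true
      · simp [h]
      · simp [h]

theorem pvStepA_seen_pres
    (s : PySem.Dict (String × String) String × PySem.Dict String Int ×
         PySem.Dict String String × PySem.Dict Int String)
    (p : Int × List (String × String)) (k : String × String) (h : s.1.contains k = true) :
    (pvStepA s p).1.contains k = true ∧ (pvStepA s p).1.getD k "" = s.1.getD k "" := by
  unfold pvStepA
  by_cases hc : s.1.contains (pvKey p.2) = true
  · simp [hc, h]
  · have hne : k ≠ pvKey p.2 := by intro he; rw [he] at h; exact hc h
    simp [hc, PySem.Dict.contains_insert, h, PySem.Dict.getD_insert, hne]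

theorem pvStepA_seen_contains
    (s : PySem.Dict (String × String) String × PySem.Dict String Int ×
         PySem.Dict String String × PySem.Dict Int String)
    (p : Int × List (String × String)) :
    (pvStepA s p).1.contains (pvKey p.2) = true := by
  unfold pvStepA
  by_cases hc : s.1.contains (pvKey p.2) = true
  · simp [hc]
  · simp [hc, PySem.Dict.contains_insert_self]

theorem pvStepA_epm
    (s : PySem.Dict (String × String) String × PySem.Dict String Int ×
         PySem.Dict String String × PySem.Dict Int String)
    (p : Int × List (String × String)) :
    (pvStepA s p).2.2.2 = s.2.2.2.insert p.1 ((pvStepA s p).1.getD (pvKey p.2) "") := by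
  unfold pvStepA
  by_cases hc : s.1.contains (pvKey p.2) = true
  · simp [hc]
  · simp [hc, PySem.Dict.getD_insert_self]

theorem pv_seen_mono (l : List (Int × List (String × String)))
    (s : PySem.Dict (String × String) String × PySem.Dict String Int ×
         PySem.Dict String String × PySem.Dict Int String)
    (k : String × String) (h : s.1.contains k = true) :
    (l.foldl pvStepA s).1.contains k = true ∧
    (l.foldl pvStepA s).1.getD k "" = s.1.getD k "" := by
  induction l generalizing s with
  | nil => exact ⟨h, rfl⟩
  | cons p l ih =>
      simp only [List.foldl_cons]
      obtain ⟨h1, h2⟩ := pvStepA_seen_pres s p k h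
      obtain ⟨h3, h4⟩ := ih (pvStepA s p) h1
      exact ⟨h3, h4.trans h2⟩

theorem pv_epm_eq (l : List (Int × List (String × String)))
    (s : PySem.Dict (String × String) String × PySem.Dict String Int ×
         PySem.Dict String String × PySem.Dict Int String) :
    (l.foldl pvStepA s).2.2.2 =
      l.foldl (fun m p => m.insert p.1 ((l.foldl pvStepA s).1.getD (pvKey p.2) "")) s.2.2.2 := by
  induction l generalizing s with
  | nil => rfl
  | cons p l ih =>
      simp only [List.foldl_cons]
      rw [ih (pvStepA s p)]
      congr 1
      rw [(pv_seen_mono l (pvStepA s p) (pvKey p.2) (pvStepA_seen_contains s p)).2]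
      exact pvStepA_epm s p

-- pvFresh only looks at contains
theorem pvFresh_congr (l : List (String × String))
    (d d' : PySem.Dict (String × String) String)
    (h : ∀ k, d.contains k = d'.contains k) : pvFresh d l = pvFresh d' l := by
  induction l generalizing d d' with
  | nil => rfl
  | cons k l ih =>
      simp only [pvFresh, h k]
      by_cases hc : d'.contains k = true
      · simp only [hc, if_true]
        exact ih d d' h
      · have hc' : d'.contains k = false := by simpa using hc
        simp only [hc', Bool.false_eq_true, if_false]
        refine congrArg (k :: ·) (ih _ _ (fun k' => ?_))
        simp [PySem.Dict.contains_insert, h k']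

-- pass 1 skips duplicate keys: folding over l is folding over its fresh first occurrences
theorem pv_foldl_step1_fresh (l : List (String × String))
    (s : PySem.Dict (String × String) String × PySem.Dict String Int ×
         PySem.Dict String String) :
    l.foldl pvStep1 s = (pvFresh s.1 l).foldl pvStep1 s := by
  induction l generalizing s with
  | nil => rfl
  | cons k l ih =>
      simp only [List.foldl_cons, pvFresh]
      by_cases h : s.1.contains k = true
      · have hs : pvStep1 s k = s := by unfold pvStep1; simp [h]
        simp only [h, if_true, hs]
        exact ih s
      · have h' : s.1.contains k = false := by simpa using h
        simp only [h', Bool.false_eq_true, if_false, List.foldl_cons]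
        rw [ih (pvStep1 s k)]
        congr 1
        refine pvFresh_congr l _ _ (fun k' => ?_)
        unfold pvStep1
        simp [h, PySem.Dict.contains_insert]

theorem pvFresh_set (l : List (String × String))
    (d : PySem.Dict (String × String) String) (t : PySem.Set (String × String))
    (h : ∀ k, d.contains k = t.contains k) :
    t ++ pvFresh d l = PySem.Set.update t l := by
  induction l generalizing d t with
  | nil => simp [pvFresh, PySem.Set.update]
  | cons k l ih =>
      simp only [pvFresh, PySem.Set.update, List.foldl_cons, h k]
      by_cases hc : t.contains k = true
      · simp only [hc, if_true]
        have : PySem.Set.add t k = t := by unfold PySem.Set.add; rw [hc]; simp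

        rw [this]
        exact ih d t h
      · have hc' : t.contains k = false := by simpa using hc
        simp only [hc', Bool.false_eq_true, if_false]
        have hadd : PySem.Set.add t k = t ++ [k] := by unfold PySem.Set.add; rw [hc']; simp
        rw [hadd]
        have := ih (d.insert k "") (t ++ [k]) (fun k' => by
          simp only [PySem.Dict.contains_insert, h k']
          apply Bool.eq_iff_iff.mpr
          simp only [PySem.Set.contains, List.contains_eq_mem, Bool.or_eq_true, beq_iff_eq,
            decide_eq_true_eq, List.mem_append, List.mem_cons, List.not_mem_nil, or_false]
          tauto)
        rw [show List.foldl PySem.Set.add (t ++ [k]) l = (t ++ [k]).update l from rfl, ← this]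
        simp

theorem pvFresh_empty (l : List (String × String)) :
    pvFresh PySem.Dict.empty l = PySem.List.dedup l := by
  have h := pvFresh_set l PySem.Dict.empty []
    (fun k => by simp [PySem.Dict.contains_empty, PySem.Set.contains])
  simpa [PySem.List.dedup_eq_ofList, PySem.Set.ofList_eq_foldl, PySem.Set.update] using h

-- keys of the spec seen dict
theorem pv_seenSpec_keys (p : List (String × String)) :
    (pvSeenSpec p).keys = PySem.List.dedup p := by
  unfold pvSeenSpec
  rw [PySem.Dict.keys_foldl_insert_key (PySem.List.enumerate p) (fun q => q.2)
      (fun _ q => pvPh q.2.1 (1 + pvCnt (p.take q.1.toNat) q.2.1)) PySem.Dict.empty]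
  rw [show (PySem.List.enumerate p).map (fun q => q.2) = p from PySem.List.map_snd_enumerate p 0]
  rw [PySem.List.dedup_eq_ofList, PySem.Set.ofList_eq_foldl]
  rfl

theorem pv_seenSpec_items (p : List (String × String)) (hnd : p.Nodup) :
    (pvSeenSpec p).items = (PySem.List.enumerate p).map
      (fun q => (q.2, pvPh q.2.1 (1 + pvCnt (p.take q.1.toNat) q.2.1))) := by
  unfold pvSeenSpec
  rw [PySem.Dict.items_foldl_insert_fresh (PySem.List.enumerate p) (fun q => q.2)
      (fun q => pvPh q.2.1 (1 + pvCnt (p.take q.1.toNat) q.2.1)) PySem.Dict.empty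
      (fun a _ => PySem.Dict.contains_empty a.2)
      (by rw [show (PySem.List.enumerate p).map (fun q => q.2) = p from
            PySem.List.map_snd_enumerate p 0]; exact hnd)]
  rw [show (PySem.Dict.empty : PySem.Dict (String × String) String).items = [] from rfl,
    List.nil_append]

theorem pv_seenSpec_append (p : List (String × String)) (k : String × String) :
    pvSeenSpec (p ++ [k]) = (pvSeenSpec p).insert k (pvPh k.1 (1 + pvCnt p k.1)) := by
  unfold pvSeenSpec
  rw [PySem.List.enumerate_append, PySem.List.enumerate_cons, PySem.List.enumerate_nil,
    List.foldl_append]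
  simp only [List.foldl_cons, List.foldl_nil]
  rw [PySem.List.foldl_congr_mem _ _
      (fun m q => m.insert q.2 (pvPh q.2.1 (1 + pvCnt (p.take q.1.toNat) q.2.1))) _
      (fun acc q hq => by
        obtain ⟨j, hj, hq⟩ := (PySem.List.mem_enumerate_iff p 0 q).mp hq
        subst hq
        simp only [Int.zero_add, Int.toNat_natCast]
        rw [List.take_append_of_le_length (le_of_lt hj)])]
  rw [show ((0 : Int) + (p.length : Int)).toNat = p.length by omega, List.take_left]

theorem pv_mappSpec_append (p : List (String × String)) (k : String × String) :
    pvMappSpec (p ++ [k]) = (pvMappSpec p).insert (pvPh k.1 (1 + pvCnt p k.1)) k.2 := by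
  unfold pvMappSpec
  rw [PySem.List.enumerate_append, PySem.List.enumerate_cons, PySem.List.enumerate_nil,
    List.foldl_append]
  simp only [List.foldl_cons, List.foldl_nil]
  rw [PySem.List.foldl_congr_mem _ _
      (fun m q => m.insert (pvPh q.2.1 (1 + pvCnt (p.take q.1.toNat) q.2.1)) q.2.2) _
      (fun acc q hq => by
        obtain ⟨j, hj, hq⟩ := (PySem.List.mem_enumerate_iff p 0 q).mp hq
        subst hq
        simp only [Int.zero_add, Int.toNat_natCast]
        rw [List.take_append_of_le_length (le_of_lt hj)])]
  rw [show ((0 : Int) + (p.length : Int)).toNat = p.length by omega, List.take_left]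

theorem pvStep1_not_contains
    (s : PySem.Dict (String × String) String × PySem.Dict String Int ×
         PySem.Dict String String)
    (k : String × String) (h : s.1.contains k = false) :
    pvStep1 s k =
      (s.1.insert k (pvPh k.1 (s.2.1.getD k.1 0 + 1)),
       s.2.1.insert k.1 (s.2.1.getD k.1 0 + 1),
       s.2.2.insert (pvPh k.1 (s.2.1.getD k.1 0 + 1)) k.2) := by
  unfold pvStep1
  simp [h]

-- the pass-1 invariant: closed forms of seen, counters lookups and mappings over nodup keys
theorem pv_step1_spec (p : List (String × String)) (hnd : p.Nodup) :
    (p.foldl pvStep1 (PySem.Dict.empty, PySem.Dict.empty, PySem.Dict.empty)).1 = pvSeenSpec p ∧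
    (∀ t, (p.foldl pvStep1 (PySem.Dict.empty, PySem.Dict.empty, PySem.Dict.empty)).2.1.getD t 0 = pvCnt p t) ∧
    (p.foldl pvStep1 (PySem.Dict.empty, PySem.Dict.empty, PySem.Dict.empty)).2.2 = pvMappSpec p := by
  induction p using List.reverseRecOn with
  | nil =>
      refine ⟨rfl, fun t => ?_, rfl⟩
      simp [pvCnt, PySem.Dict.getD_empty]
  | append_singleton p k ih =>
      have hp : p.Nodup := hnd.sublist (List.sublist_append_left p [k])
      have hk : k ∉ p := by
        intro hm
        simp only [List.nodup_append, List.nodup_cons, List.not_mem_nil, not_false_iff,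
          List.nodup_nil, and_true] at hnd
        exact hnd.2.2 k hm k (List.mem_singleton_self k) rfl
      obtain ⟨ih1, ih2, ih3⟩ := ih hp
      simp only [List.foldl_append, List.foldl_cons, List.foldl_nil]
      have hcont : (p.foldl pvStep1 (PySem.Dict.empty, PySem.Dict.empty, PySem.Dict.empty)).1.contains k = false := by
        rw [ih1]
        have : ¬ (pvSeenSpec p).contains k = true := by
          rw [PySem.Dict.contains_iff_mem_keys, pv_seenSpec_keys, PySem.List.mem_dedup]
          exact hk
        simpa using this
      rw [pvStep1_not_contains _ _ hcont]
      refine ⟨?_, fun t => ?_, ?_⟩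
      · rw [pv_seenSpec_append, ih1, ih2 k.1, Int.add_comm]
      · rw [PySem.Dict.getD_insert]
        by_cases ht : t = k.1
        · rw [if_pos ht, ih2 k.1]
          subst ht
          unfold pvCnt
          rw [List.filter_append]
          simp only [List.filter_cons, List.filter_nil, beq_self_eq_true, if_true]
          simp only [List.length_append, List.length_cons, List.length_nil]
          push_cast
          omega
        · rw [if_neg ht, ih2 t]
          have hb : (k.1 == t) = false := by simp [Ne.symm ht]
          unfold pvCnt
          rw [List.filter_append]
          simp [hb]
      · rw [pv_mappSpec_append, ih3, ih2 k.1, Int.add_comm]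

-- B's group dict in closed form
def pvGrp (p : List (String × String)) (t : String) : List String :=
  (p.filter (fun r => r.1 == t)).map (fun r => r.2)

def pvBlock (pr : String × List String) : List ((String × String) × String) :=
  (PySem.List.enumerate pr.2 1).map (fun q => ((pr.1, q.2), pvPh pr.1 q.1))

theorem pv_groups_items (p : List (String × String)) :
    (p.foldl pvGroupStep PySem.Dict.empty).items
      = (PySem.List.dedup (p.map (fun r => r.1))).map (fun t => (t, pvGrp p t)) := by
  have hkeys : (p.foldl pvGroupStep PySem.Dict.empty).keys
      = PySem.List.dedup (p.map (fun r => r.1)) := by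
    rw [show p.foldl pvGroupStep PySem.Dict.empty
        = p.foldl (fun d x => d.modify x.1 [] (fun v => v ++ [x.2])) PySem.Dict.empty from rfl]
    rw [PySem.Dict.keys_foldl_modify_key p (fun x => x.1) [] (fun _ x v => v ++ [x.2])
      PySem.Dict.empty]
    rw [PySem.List.dedup_eq_ofList, PySem.Set.ofList_eq_foldl, PySem.Dict.keys_empty]
    rfl
  have hnd : (p.foldl pvGroupStep PySem.Dict.empty).keys.Nodup := by
    rw [show p.foldl pvGroupStep PySem.Dict.empty
        = p.foldl (fun d x => d.modify x.1 [] (fun v => v ++ [x.2])) PySem.Dict.empty from rfl]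
    exact PySem.Dict.nodup_keys_foldl_modify_key p (fun x => x.1) [] (fun _ x v => v ++ [x.2])
      PySem.Dict.empty PySem.Dict.nodup_keys_empty
  rw [PySem.Dict.items_eq_map_keys _ hnd [], hkeys]
  refine List.map_congr_left (fun t _ => ?_)
  have hg : (p.foldl pvGroupStep PySem.Dict.empty).getD t [] = pvGrp p t := by
    rw [show p.foldl pvGroupStep PySem.Dict.empty
        = p.foldl (fun d x => d.modify x.1 [] (fun v => v ++ [x.2])) PySem.Dict.empty from rfl]
    rw [PySem.Dict.getD_foldl_modify_append p PySem.Dict.empty t, PySem.Dict.getD_empty]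
    rfl
  rw [hg]

-- nodup facts about the grouped texts
theorem pv_grp_nodup (p : List (String × String)) (hnd : p.Nodup) (t : String) :
    (pvGrp p t).Nodup := by
  unfold pvGrp
  refine List.Nodup.map_on ?_ (hnd.filter _)
  intro x hx y hy hxy
  have hxt : x.1 = t := by simpa using (List.mem_filter.mp hx).2
  have hyt : y.1 = t := by simpa using (List.mem_filter.mp hy).2
  exact Prod.ext (hxt.trans hyt.symm) hxy

-- the nested dict-comprehension flattens: items in group order, keys unique
theorem pv_seenOfGroups_aux (L : List (String × List String))
    (m : PySem.Dict (String × String) String)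
    (hfr : ∀ x : String × String, m.contains x = true → x.1 ∉ L.map (fun pr => pr.1))
    (hmk : m.keys.Nodup)
    (hty : (L.map (fun pr => pr.1)).Nodup)
    (htx : ∀ pr ∈ L, pr.2.Nodup) :
    (L.foldl (fun m p =>
        (PySem.List.enumerate p.2 1).foldl (fun m q => m.insert (p.1, q.2) (pvPh p.1 q.1)) m) m).items
      = m.items ++ L.flatMap pvBlock
    ∧ (L.foldl (fun m p =>
        (PySem.List.enumerate p.2 1).foldl (fun m q => m.insert (p.1, q.2) (pvPh p.1 q.1)) m) m).keys.Nodup := by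
  induction L generalizing m with
  | nil => exact ⟨by simp, hmk⟩
  | cons pr L ih =>
      rw [List.map_cons, List.nodup_cons] at hty
      simp only [List.foldl_cons]
      have hfresh : ∀ a ∈ PySem.List.enumerate pr.2 1, m.contains (pr.1, a.2) = false := by
        intro a _
        cases hc : m.contains (pr.1, a.2) with
        | false => rfl
        | true => exact absurd (hfr _ hc) (by simp)
      have hkmap : ((PySem.List.enumerate pr.2 1).map (fun a => (pr.1, a.2))).Nodup := by
        rw [show (fun a : Int × String => (pr.1, a.2))
            = (fun txt => (pr.1, txt)) ∘ (fun a : Int × String => a.2) from rfl,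
          ← List.map_map, PySem.List.map_snd_enumerate]
        exact (htx pr (List.mem_cons_self)).map (fun a b h => by simpa using h)
      have hitems := PySem.Dict.items_foldl_insert_fresh (PySem.List.enumerate pr.2 1)
        (fun a => (pr.1, a.2)) (fun a => pvPh pr.1 a.1) m hfresh hkmap
      have hkeys : ((PySem.List.enumerate pr.2 1).foldl
          (fun m q => m.insert (pr.1, q.2) (pvPh pr.1 q.1)) m).keys
          = m.keys ++ (PySem.List.enumerate pr.2 1).map (fun a => (pr.1, a.2)) := by
        rw [show ∀ d : PySem.Dict (String × String) String, d.keys = d.items.map (fun x => x.1)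
          from fun _ => rfl, hitems]
        simp [List.map_map]
        rfl
      have hknd : ((PySem.List.enumerate pr.2 1).foldl
          (fun m q => m.insert (pr.1, q.2) (pvPh pr.1 q.1)) m).keys.Nodup := by
        rw [hkeys, List.nodup_append]
        refine ⟨hmk, hkmap, ?_⟩
        intro a ha b hb hab
        subst hab
        have hc : m.contains a = true := by
          rw [PySem.Dict.contains_iff_mem_keys]; exact ha
        have := hfr a hc
        obtain ⟨q, _, hq⟩ := List.mem_map.mp hb
        apply this
        rw [← hq]
        simp
      have hfr' : ∀ x : String × String, ((PySem.List.enumerate pr.2 1).foldl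
          (fun m q => m.insert (pr.1, q.2) (pvPh pr.1 q.1)) m).contains x = true
          → x.1 ∉ L.map (fun pr => pr.1) := by
        intro x hx
        rw [PySem.Dict.contains_iff_mem_keys, hkeys, List.mem_append] at hx
        rcases hx with hx | hx
        · have := hfr x (by rw [PySem.Dict.contains_iff_mem_keys]; exact hx)
          intro hm
          exact this (by simp [hm])
        · obtain ⟨q, _, hq⟩ := List.mem_map.mp hx
          have : x.1 = pr.1 := by rw [← hq]
          rw [this]
          exact hty.1
      obtain ⟨ihi, ihk⟩ := ih _ hfr' hknd hty.2
        (fun pr' h => htx pr' (List.mem_cons_of_mem _ h))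
      refine ⟨?_, ihk⟩
      rw [ihi, hitems, List.flatMap_cons, List.append_assoc]
      rfl

theorem pv_seenSpec_keys_nodup (p : List (String × String)) : (pvSeenSpec p).keys.Nodup := by
  rw [pv_seenSpec_keys]
  exact PySem.List.nodup_dedup p

-- looking a first-occurrence key up in the finished spec seen dict gives its placeholder
theorem pv_seenSpec_getD_mem (p : List (String × String)) (hnd : p.Nodup)
    (q : Int × (String × String)) (hq : q ∈ PySem.List.enumerate p) :
    (pvSeenSpec p).getD q.2 "" = pvPh q.2.1 (1 + pvCnt (p.take q.1.toNat) q.2.1) := by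
  have hmem : (q.2, pvPh q.2.1 (1 + pvCnt (p.take q.1.toNat) q.2.1)) ∈ (pvSeenSpec p).items := by
    rw [pv_seenSpec_items p hnd]
    exact List.mem_map_of_mem hq
  rw [PySem.Dict.getD_eq_get?_getD, PySem.Dict.get?_of_mem_items _ hmem (pv_seenSpec_keys_nodup p)]
  rfl

-- B's grouped seen dict agrees with the spec seen dict on every lookup
theorem pv_seenB_get? (p : List (String × String)) (hnd : p.Nodup) (k : String × String) :
    (pvSeenOfGroups (p.foldl pvGroupStep PySem.Dict.empty).items).get? k = (pvSeenSpec p).get? k := by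
  have haux := pv_seenOfGroups_aux
    ((PySem.List.dedup (p.map (fun r => r.1))).map (fun t => (t, pvGrp p t))) PySem.Dict.empty
    (fun x hx => absurd hx (by simp [PySem.Dict.contains_empty]))
    (by rw [PySem.Dict.keys_empty]; exact List.nodup_nil)
    (by rw [List.map_map]
        exact (PySem.List.nodup_dedup (p.map (fun r => r.1))).map (fun a b h => h) )
    (by intro pr hpr
        obtain ⟨t, _, rfl⟩ := List.mem_map.mp hpr
        exact pv_grp_nodup p hnd t)
  have hitems : (pvSeenOfGroups (p.foldl pvGroupStep PySem.Dict.empty).items).items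
      = ((PySem.List.dedup (p.map (fun r => r.1))).map (fun t => (t, pvGrp p t))).flatMap pvBlock := by
    rw [show pvSeenOfGroups (p.foldl pvGroupStep PySem.Dict.empty).items
        = pvSeenOfGroups ((PySem.List.dedup (p.map (fun r => r.1))).map (fun t => (t, pvGrp p t)))
        from by rw [pv_groups_items p]]
    rw [show (PySem.Dict.empty : PySem.Dict (String × String) String).items = [] from rfl] at haux
    simpa [pvSeenOfGroups] using haux.1
  have hknd : (pvSeenOfGroups (p.foldl pvGroupStep PySem.Dict.empty).items).keys.Nodup := by
    rw [show pvSeenOfGroups (p.foldl pvGroupStep PySem.Dict.empty).items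
        = pvSeenOfGroups ((PySem.List.dedup (p.map (fun r => r.1))).map (fun t => (t, pvGrp p t)))
        from by rw [pv_groups_items p]]
    simpa [pvSeenOfGroups] using haux.2
  by_cases hk : k ∈ p
  · obtain ⟨pre, suf, hps⟩ := List.append_of_mem hk
    subst hps
    have hknp : k ∉ pre := by
      intro hm
      rw [List.nodup_append] at hnd
      exact hnd.2.2 k hm k (List.mem_cons_self) rfl
    have hjlen : pre.length < (pre ++ k :: suf).length := by simp
    -- the common value
    have hspec : (pvSeenSpec (pre ++ k :: suf)).get? k
        = some (pvPh k.1 (1 + pvCnt pre k.1)) := by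
      have hq : ((0:Int) + (pre.length : Int), k) ∈ PySem.List.enumerate (pre ++ k :: suf) := by
        rw [PySem.List.mem_enumerate_iff]
        refine ⟨pre.length, hjlen, ?_⟩
        rw [List.getElem_append_right (le_refl pre.length)]
        simp
      have hmem : (k, pvPh k.1 (1 + pvCnt ((pre ++ k :: suf).take
          ((0:Int) + (pre.length : Int)).toNat) k.1)) ∈ (pvSeenSpec (pre ++ k :: suf)).items := by
        rw [pv_seenSpec_items _ hnd]
        exact List.mem_map_of_mem hq
      rw [PySem.Dict.get?_of_mem_items _ hmem (pv_seenSpec_keys_nodup _)]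
      congr 2
      rw [show ((0:Int) + (pre.length : Int)).toNat = pre.length by omega, List.take_left]
    have hB : (pvSeenOfGroups ((pre ++ k :: suf).foldl pvGroupStep PySem.Dict.empty).items).get? k
        = some (pvPh k.1 (1 + pvCnt pre k.1)) := by
      have hgrp : pvGrp (pre ++ k :: suf) k.1 = pvGrp pre k.1 ++ k.2 :: pvGrp suf k.1 := by
        unfold pvGrp
        rw [List.filter_append, List.filter_cons]
        simp
      have hqmem : ((1:Int) + ((pvGrp pre k.1).length : Int), k.2)
          ∈ PySem.List.enumerate (pvGrp (pre ++ k :: suf) k.1) 1 := by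
        rw [PySem.List.mem_enumerate_iff]
        refine ⟨(pvGrp pre k.1).length, by rw [hgrp]; simp, ?_⟩
        have hg : ∀ h2 : (pvGrp pre k.1).length < (pvGrp (pre ++ k :: suf) k.1).length,
            (pvGrp (pre ++ k :: suf) k.1)[(pvGrp pre k.1).length]'h2 = k.2 := by
          intro h2
          simp only [hgrp] at h2 ⊢
          simp
        rw [hg]
      have hblock : (k, pvPh k.1 (1 + ((pvGrp pre k.1).length : Int)))
          ∈ pvBlock (k.1, pvGrp (pre ++ k :: suf) k.1) := by
        have := List.mem_map_of_mem
          (f := fun q : Int × String => ((k.1, q.2), pvPh k.1 q.1)) hqmem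
        simpa [pvBlock, Prod.mk.eta] using this
      have hmem : (k, pvPh k.1 (1 + ((pvGrp pre k.1).length : Int)))
          ∈ (pvSeenOfGroups ((pre ++ k :: suf).foldl pvGroupStep PySem.Dict.empty).items).items := by
        rw [hitems, List.mem_flatMap]
        refine ⟨(k.1, pvGrp (pre ++ k :: suf) k.1), ?_, hblock⟩
        refine List.mem_map_of_mem ?_
        rw [PySem.List.mem_dedup]
        exact List.mem_map_of_mem hk
      rw [PySem.Dict.get?_of_mem_items _ hmem hknd]
      congr 3
      unfold pvCnt pvGrp
      simp
    rw [hspec, hB]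
  · have h1 : (pvSeenSpec (p)).get? k = none := by
      rw [PySem.Dict.get?_eq_none_iff_not_mem_keys, pv_seenSpec_keys, PySem.List.mem_dedup]
      exact hk
    have h2 : (pvSeenOfGroups (p.foldl pvGroupStep PySem.Dict.empty).items).get? k = none := by
      rw [PySem.Dict.get?_eq_none_iff_not_mem_keys]
      intro hmem
      rw [show (pvSeenOfGroups (p.foldl pvGroupStep PySem.Dict.empty).items).keys
          = (pvSeenOfGroups (p.foldl pvGroupStep PySem.Dict.empty).items).items.map (fun x => x.1)
          from rfl, hitems] at hmem
      obtain ⟨it, hit, hfst⟩ := List.mem_map.mp hmem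
      obtain ⟨pr, hprL, hinb⟩ := List.mem_flatMap.mp hit
      obtain ⟨t, _, rfl⟩ := List.mem_map.mp hprL
      obtain ⟨q, hq, rfl⟩ := List.mem_map.mp hinb
      obtain ⟨j, hj, rfl⟩ := (PySem.List.mem_enumerate_iff _ _ _).mp hq
      obtain ⟨r, hrf, hr2⟩ := List.mem_map.mp (List.getElem_mem hj)
      have hrp : r ∈ p := (List.mem_filter.mp hrf).1
      have hrt : r.1 = t := by simpa using (List.mem_filter.mp hrf).2
      apply hk
      have : r = k := by
        rw [← hfst]
        exact Prod.ext hrt (by simpa using hr2)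
      rw [← this]
      exact hrp
    rw [h1, h2]

theorem pv_seenB_getD (p : List (String × String)) (hnd : p.Nodup) (k : String × String) :
    (pvSeenOfGroups (p.foldl pvGroupStep PySem.Dict.empty).items).getD k "" = (pvSeenSpec p).getD k "" := by
  rw [PySem.Dict.getD_eq_get?_getD, PySem.Dict.getD_eq_get?_getD, pv_seenB_get? p hnd k]

-- folding the insert of looked-up placeholders over the firsts rebuilds the spec mappings dict
theorem pv_mapp_fold (p : List (String × String))
    (d : PySem.Dict (String × String) String)
    (hd : ∀ q ∈ PySem.List.enumerate p, d.getD q.2 "" = pvPh q.2.1 (1 + pvCnt (p.take q.1.toNat) q.2.1)) :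
    p.foldl (fun m k => m.insert (d.getD k "") k.2) PySem.Dict.empty = pvMappSpec p := by
  conv_lhs => rw [← PySem.List.map_snd_enumerate p 0]
  rw [List.foldl_map]
  unfold pvMappSpec
  exact PySem.List.foldl_congr_mem _ _ _ _ (fun acc q hq => by rw [hd q hq])

-- ===== VERDICT (by name: the statement is the Claim_ definition above) =====
theorem generate_placeholders_spec : Claim_equal_generate_placeholders := by
  intro entities _ _
  unfold Spec_generate_placeholders generate_placeholders generate_placeholders_alt
  dsimp only
  have hnd : (PySem.List.dedup (entities.map pvKey)).Nodup :=
    PySem.List.nodup_dedup (entities.map pvKey)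
  -- A's pass-1 state
  have hproj := pv_proj3_foldl (PySem.List.enumerate entities)
    (PySem.Dict.empty, PySem.Dict.empty, PySem.Dict.empty, PySem.Dict.empty)
  have hmap : (PySem.List.enumerate entities).map (fun p => pvKey p.2) = entities.map pvKey := by
    rw [show (fun p : Int × List (String × String) => pvKey p.2)
        = pvKey ∘ (fun p : Int × List (String × String) => p.2) from rfl,
      ← List.map_map, PySem.List.map_snd_enumerate]
  rw [hmap] at hproj
  rw [show pvProj3 (PySem.Dict.empty, PySem.Dict.empty, PySem.Dict.empty, PySem.Dict.empty)
      = ((PySem.Dict.empty, PySem.Dict.empty, PySem.Dict.empty) :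
        PySem.Dict (String × String) String × PySem.Dict String Int ×
        PySem.Dict String String) from rfl] at hproj
  have hfold1 : (entities.map pvKey).foldl pvStep1
      (PySem.Dict.empty, PySem.Dict.empty, PySem.Dict.empty)
      = (PySem.List.dedup (entities.map pvKey)).foldl pvStep1
        (PySem.Dict.empty, PySem.Dict.empty, PySem.Dict.empty) := by
    rw [pv_foldl_step1_fresh, pvFresh_empty]
  rw [hfold1] at hproj
  obtain ⟨hs1, hs2, hs3⟩ := pv_step1_spec (PySem.List.dedup (entities.map pvKey)) hnd
  have hA1 : ((PySem.List.enumerate entities).foldl pvStepA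
      (PySem.Dict.empty, PySem.Dict.empty, PySem.Dict.empty, PySem.Dict.empty)).1
      = pvSeenSpec (PySem.List.dedup (entities.map pvKey)) := by
    rw [show ((PySem.List.enumerate entities).foldl pvStepA
        (PySem.Dict.empty, PySem.Dict.empty, PySem.Dict.empty, PySem.Dict.empty)).1
        = (pvProj3 ((PySem.List.enumerate entities).foldl pvStepA
          (PySem.Dict.empty, PySem.Dict.empty, PySem.Dict.empty, PySem.Dict.empty))).1 from rfl,
      hproj]
    exact hs1
  have hA3 : ((PySem.List.enumerate entities).foldl pvStepA
      (PySem.Dict.empty, PySem.Dict.empty, PySem.Dict.empty, PySem.Dict.empty)).2.2.1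
      = pvMappSpec (PySem.List.dedup (entities.map pvKey)) := by
    rw [show ((PySem.List.enumerate entities).foldl pvStepA
        (PySem.Dict.empty, PySem.Dict.empty, PySem.Dict.empty, PySem.Dict.empty)).2.2.1
        = (pvProj3 ((PySem.List.enumerate entities).foldl pvStepA
          (PySem.Dict.empty, PySem.Dict.empty, PySem.Dict.empty, PySem.Dict.empty))).2.2 from rfl,
      hproj]
    exact hs3
  -- B's seen dict looks up like the spec seen dict
  have hseenB : ∀ x : String × String,
      (pvSeenOfGroups ((PySem.List.dedup (entities.map pvKey)).foldl pvGroupStep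
        PySem.Dict.empty).items).getD x ""
      = (pvSeenSpec (PySem.List.dedup (entities.map pvKey))).getD x "" :=
    pv_seenB_getD (PySem.List.dedup (entities.map pvKey)) hnd
  refine Prod.ext ?_ ?_
  · -- mappings
    rw [hA3]
    have hB := pv_mapp_fold (PySem.List.dedup (entities.map pvKey))
      (pvSeenOfGroups ((PySem.List.dedup (entities.map pvKey)).foldl pvGroupStep
        PySem.Dict.empty).items)
      (fun q hq => by
        rw [hseenB q.2]
        exact pv_seenSpec_getD_mem (PySem.List.dedup (entities.map pvKey)) hnd q hq)
    rw [hB]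
  · -- entity_placeholder_map
    rw [pv_epm_eq]
    rw [show ((PySem.Dict.empty, PySem.Dict.empty, PySem.Dict.empty, PySem.Dict.empty) :
        PySem.Dict (String × String) String × PySem.Dict String Int ×
        PySem.Dict String String × PySem.Dict Int String).2.2.2 = PySem.Dict.empty from rfl]
    rw [pv_enumerate_map entities pvKey 0, List.foldl_map]
    have hfun : (fun (m : PySem.Dict Int String) (q : Int × List (String × String)) =>
        m.insert q.1 ((pvSeenOfGroups ((PySem.List.dedup (entities.map pvKey)).foldl pvGroupStep
          PySem.Dict.empty).items).getD (pvKey q.2) ""))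
        = (fun (m : PySem.Dict Int String) (q : Int × List (String × String)) =>
        m.insert q.1 (((PySem.List.enumerate entities).foldl pvStepA
          (PySem.Dict.empty, PySem.Dict.empty, PySem.Dict.empty, PySem.Dict.empty)).1.getD
          (pvKey q.2) "")) := by
      funext m q
      rw [hseenB (pvKey q.2), hA1]
    rw [hfun]
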